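-- pv_equiv track=rewrite | github.com/wrmsr/omlish | omdev/pyproject/configs.py | _resolve_srcs
-- ===== SOURCE A (Python) =====
-- import typing as ta
--
-- def _resolve_srcs(
--
--         lst: ta.Sequence[str],
--         aliases: ta.Mapping[str, ta.Sequence[str]],
-- ) -> ta.List[str]:
--     todo = list(reversed(lst))
--     raw: ta.List[str] = []
--     seen: ta.Set[str] = set()
--
--     while todo:
--         cur = todo.pop()
--         if cur in seen:
--             continue
--
--         seen.add(cur)
--         if not cur.startswith('@'):
--             raw.append(cur)
--             continue
--
--         todo.extend(aliases[cur[1:]][::-1])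
--
--     return raw
-- ===== SOURCE B (Python) =====
-- import typing as ta
--
-- def _resolve_srcs(
--         lst: ta.Sequence[str],
--         aliases: ta.Mapping[str, ta.Sequence[str]],
-- ) -> ta.List[str]:
--     # Recursive DFS over the alias graph instead of an explicit reversed todo stack.
--     raw: ta.List[str] = []
--     seen: ta.Set[str] = set()
--
--     def visit(cur: str) -> None:
--         if cur in seen:
--             return
--         seen.add(cur)
--         if not cur.startswith('@'):
--             raw.append(cur)
--             return
--         for child in aliases[cur[1:]]:
--             visit(child)
--
--     for x in lst:
--         visit(x)
--     return raw
-- ===== Notes on version B (the rewrite author's own statement) =====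
-- stated objective: alternative
-- what changed: The explicit reversed todo stack with pop/extend is replaced by a recursive visit() helper that walks the alias graph in forward order, sharing raw and seen.
-- outside the precondition, e.g. on _resolve_srcs(['w'], {'a': ['@b'], 'b': ['@z']}): A returns ['w'], B returns ['w']
import Mathlib
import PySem

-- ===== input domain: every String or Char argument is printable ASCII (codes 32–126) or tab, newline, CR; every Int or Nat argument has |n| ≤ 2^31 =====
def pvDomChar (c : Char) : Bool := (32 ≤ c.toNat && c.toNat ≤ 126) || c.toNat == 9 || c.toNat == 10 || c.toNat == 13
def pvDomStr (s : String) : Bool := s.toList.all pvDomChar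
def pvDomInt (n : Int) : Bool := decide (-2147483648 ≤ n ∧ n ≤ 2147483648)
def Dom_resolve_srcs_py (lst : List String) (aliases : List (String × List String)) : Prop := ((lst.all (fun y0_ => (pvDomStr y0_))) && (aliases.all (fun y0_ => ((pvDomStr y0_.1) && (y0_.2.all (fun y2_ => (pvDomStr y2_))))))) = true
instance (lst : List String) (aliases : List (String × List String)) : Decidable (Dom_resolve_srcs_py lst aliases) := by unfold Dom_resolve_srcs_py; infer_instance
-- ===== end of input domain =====

-- One honest line: B replaces A's explicit reversed todo stack by a recursive visit over the
-- alias graph in forward order (same raw/seen state); equal output on every input inside Pre_.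

-- shared helper: aliases[k] (first match; 'none' = Python KeyError, excluded by Pre_)
def aliasGet? (aliases : List (String × List String)) (k : String) : Option (List String) :=
  (aliases.find? (fun p => p.1 == k)).map (·.2)

-- cur[1:]
def strTail (cur : String) : String :=
  String.ofList (PySem.List.slice cur.toList (some 1) none)

-- termination measure: number of '@'-tagged alias keys not yet in seen
def tagStr (k : String) : String := String.ofList ('@' :: k.toList)

def unseen (aliases : List (String × List String)) (seen : PySem.Set String) : Nat :=
  ((aliases.map (fun p => tagStr p.1)).toFinset \ seen.toFinset).card

theorem unseen_add_le (aliases : List (String × List String)) (seen : PySem.Set String)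
    (cur : String) : unseen aliases (seen.add cur) ≤ unseen aliases seen := by
  apply Finset.card_le_card
  intro x hx
  simp only [Finset.mem_sdiff, List.mem_toFinset, PySem.Set.mem_add] at *
  exact ⟨hx.1, fun hc => hx.2 (Or.inl hc)⟩

theorem unseen_add_lt (aliases : List (String × List String)) (seen : PySem.Set String)
    (cur : String) (hmem : cur ∈ aliases.map (fun p => tagStr p.1))
    (hns : seen.contains cur = false) :
    unseen aliases (seen.add cur) < unseen aliases seen := by
  have hnm : cur ∉ seen := by
    intro hc
    have h2 : PySem.Set.contains seen cur = true := List.contains_iff_mem.mpr hc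
    rw [h2] at hns
    simp at hns
  apply Finset.card_lt_card
  constructor
  · intro x hx
    simp only [Finset.mem_sdiff, List.mem_toFinset, PySem.Set.mem_add] at *
    exact ⟨hx.1, fun hc => hx.2 (Or.inl hc)⟩
  · intro hsub
    have h1 : cur ∈ (aliases.map (fun p => tagStr p.1)).toFinset \ seen.toFinset := by
      simp only [Finset.mem_sdiff, List.mem_toFinset]
      exact ⟨hmem, hnm⟩
    have h2 := hsub h1
    simp only [Finset.mem_sdiff, List.mem_toFinset] at h2
    exact h2.2 ((PySem.Set.mem_add seen cur cur).mpr (Or.inr rfl))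

-- if aliases[strTail cur] exists and cur starts with '@', then cur is a tagged key
theorem mem_tags_of_get?_some (aliases : List (String × List String)) (cur : String)
    (v : List String) (hst : PySem.Str.startswith cur "@" = true)
    (h : aliasGet? aliases (strTail cur) = some v) :
    cur ∈ aliases.map (fun p => tagStr p.1) := by
  unfold aliasGet? at h
  cases hf : aliases.find? (fun p => p.1 == strTail cur) with
  | none => rw [hf] at h; simp at h
  | some p =>
    have hbeq := List.find?_some hf
    have hpmem : p ∈ aliases := List.mem_of_find?_eq_some hf
    have hkey : p.1 = strTail cur := by simpa using hbeq
    obtain ⟨t, ht⟩ : ∃ t, cur.toList = '@' :: t := by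
      unfold PySem.Str.startswith PySem.Chars.startswith at hst
      cases hc : cur.toList with
      | nil => rw [hc] at hst; simp at hst
      | cons c cs =>
        rw [hc] at hst
        simp at hst
        exact ⟨cs, by rw [← hst]⟩
    have hcur : tagStr p.1 = cur := by
      rw [hkey]
      unfold strTail tagStr
      rw [PySem.List.slice_from_one, ht]
      simp only [List.tail_cons, String.toList_ofList]
      rw [← ht]
      simp
    exact List.mem_map.mpr ⟨p, hpmem, hcur⟩

-- ===== PORT A =====
-- A's 'todo' stack is kept here with its TOP at the HEAD (Python stores it reversed and pops
-- the end, and extends with aliases[...][::-1]; same stack contents, same pop order).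
def loopA (aliases : List (String × List String)) :
    List String → List String → PySem.Set String → List String × PySem.Set String
  | [], raw, seen => (raw, seen)
  | cur :: rest, raw, seen =>
    if seen.contains cur then loopA aliases rest raw seen
    else
      let seen' := seen.add cur
      if ¬ PySem.Str.startswith cur "@" then loopA aliases rest (raw ++ [cur]) seen'
      else loopA aliases ((aliasGet? aliases (strTail cur)).getD [] ++ rest) raw seen'
termination_by todo _ seen => (unseen aliases seen, todo.length)
decreasing_by
  · exact Prod.Lex.right _ (Nat.lt_succ_self _)
  · exact Prod.Lex.lt_iff'.mpr ⟨unseen_add_le _ _ _, fun _ => Nat.lt_succ_self _⟩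
  · rcases h : aliasGet? aliases (strTail cur) with _ | v
    · exact Prod.Lex.lt_iff'.mpr ⟨unseen_add_le _ _ _, fun _ => Nat.lt_succ_self _⟩
    · exact Prod.Lex.left _ _ (unseen_add_lt aliases seen cur
        (mem_tags_of_get?_some aliases cur v (by simpa using ‹¬¬PySem.Str.startswith cur "@" = true›) h)
        (by simpa using ‹¬seen.contains cur = true›))

def resolve_srcs_py (lst : List String) (aliases : List (String × List String)) : List String :=
  (loopA aliases lst [] PySem.Set.empty).1

-- ===== PORT B =====
-- B's recursive visit / the for-loop over a child list; the Nat is fuel, a totality guard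
-- only (never exhausted when called from resolve_srcs_py_alt, proved below).
mutual
def visitB (aliases : List (String × List String)) :
    Nat → String → List String → PySem.Set String → List String × PySem.Set String
  | 0, _, raw, seen => (raw, seen)
  | m + 1, cur, raw, seen =>
    if seen.contains cur then (raw, seen)
    else
      let seen' := seen.add cur
      if ¬ PySem.Str.startswith cur "@" then (raw ++ [cur], seen')
      else visitListB aliases m ((aliasGet? aliases (strTail cur)).getD []) raw seen'
termination_by m _ _ _ => (m, 0)
decreasing_by
  exact Prod.Lex.left _ _ (Nat.lt_succ_self _)

def visitListB (aliases : List (String × List String)) :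
    Nat → List String → List String → PySem.Set String → List String × PySem.Set String
  | _, [], raw, seen => (raw, seen)
  | m, c :: cs, raw, seen =>
    let st := visitB aliases m c raw seen
    visitListB aliases m cs st.1 st.2
termination_by m cs _ _ => (m, cs.length + 1)
decreasing_by
  · exact Prod.Lex.right _ (by omega)
  · exact Prod.Lex.right _ (Nat.lt_succ_self _)
end

def resolve_srcs_py_alt (lst : List String) (aliases : List (String × List String)) : List String :=
  (visitListB aliases (aliases.length + 1) lst [] PySem.Set.empty).1

-- ===== PRECONDITION & SPEC =====
-- Pre_ excludes inputs where some '@'-prefixed string occurring in lst, or in the values of an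
-- alias key that is itself mentioned (as '@key' in lst or in any alias value), has no matching
-- alias key: on the reachable ones Python raises KeyError, and since exact reachability is not a
-- closed-form condition Pre_ conservatively also excludes a few inputs (mentioned-but-unreached
-- dangling references) on which A returns.
def Pre_resolve_srcs_py (lst : List String) (aliases : List (String × List String)) : Prop :=
  (∀ s ∈ lst, s.toList.head? = some '@' → String.ofList s.toList.tail ∈ aliases.map Prod.fst) ∧
  (∀ p ∈ aliases,
    (String.ofList ('@' :: p.1.toList) ∈ lst ∨ ∃ q ∈ aliases, String.ofList ('@' :: p.1.toList) ∈ q.2) →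
    ∀ s ∈ p.2, s.toList.head? = some '@' → String.ofList s.toList.tail ∈ aliases.map Prod.fst)
instance (lst : List String) (aliases : List (String × List String)) : Decidable (Pre_resolve_srcs_py lst aliases) := by unfold Pre_resolve_srcs_py; infer_instance

def pvWitness_resolve_srcs_py : List String × (List (String × List String)) :=
  (["a", "@g", "a"], [("g", ["b", "@h", "a"]), ("h", ["c"])])

def Spec_resolve_srcs_py (lst : List String) (aliases : List (String × List String)) (out : List String) : Prop := out = resolve_srcs_py_alt lst aliases
instance (lst : List String) (aliases : List (String × List String)) (out : List String) : Decidable (Spec_resolve_srcs_py lst aliases out) := by unfold Spec_resolve_srcs_py; infer_instance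

-- ===== CLAIM (what is proved, stated in full; the proofs are below) =====
def Claim_equal_resolve_srcs_py : Prop := ∀ (lst : List String) (aliases : List (String × List String)), Dom_resolve_srcs_py lst aliases → Pre_resolve_srcs_py lst aliases → Spec_resolve_srcs_py lst aliases (resolve_srcs_py lst aliases)

-- ===== LEMMAS AND PROOFS =====

theorem unseen_mono (aliases : List (String × List String)) (s t : PySem.Set String)
    (h : ∀ x, x ∈ s → x ∈ t) : unseen aliases t ≤ unseen aliases s := by
  apply Finset.card_le_card
  intro x hx
  simp only [Finset.mem_sdiff, List.mem_toFinset] at *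
  exact ⟨hx.1, fun hc => hx.2 (h x hc)⟩


theorem loopA_nil (aliases : List (String × List String)) (raw : List String)
    (seen : PySem.Set String) : loopA aliases [] raw seen = (raw, seen) := by
  rw [loopA]

theorem loopA_cons (aliases : List (String × List String)) (cur : String)
    (rest raw : List String) (seen : PySem.Set String) :
    loopA aliases (cur :: rest) raw seen =
      if seen.contains cur then loopA aliases rest raw seen
      else if ¬ PySem.Str.startswith cur "@" then
        loopA aliases rest (raw ++ [cur]) (seen.add cur)
      else loopA aliases ((aliasGet? aliases (strTail cur)).getD [] ++ rest) raw (seen.add cur) := by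
  rw [loopA]

theorem visitB_succ (aliases : List (String × List String)) (m : Nat) (cur : String)
    (raw : List String) (seen : PySem.Set String) :
    visitB aliases (m + 1) cur raw seen =
      if seen.contains cur then (raw, seen)
      else if ¬ PySem.Str.startswith cur "@" then (raw ++ [cur], seen.add cur)
      else visitListB aliases m ((aliasGet? aliases (strTail cur)).getD []) raw (seen.add cur) := by
  rw [visitB]

theorem visitListB_nil (aliases : List (String × List String)) (m : Nat)
    (raw : List String) (seen : PySem.Set String) :
    visitListB aliases m [] raw seen = (raw, seen) := by
  rw [visitListB]

theorem visitListB_cons (aliases : List (String × List String)) (m : Nat) (c : String)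
    (cs raw : List String) (seen : PySem.Set String) :
    visitListB aliases m (c :: cs) raw seen =
      visitListB aliases m cs (visitB aliases m c raw seen).1 (visitB aliases m c raw seen).2 := by
  rw [visitListB]

theorem seen_subset_loopA (aliases : List (String × List String)) (todo raw : List String)
    (seen : PySem.Set String) :
    ∀ x, x ∈ seen → x ∈ (loopA aliases todo raw seen).2 := by
  fun_induction loopA aliases todo raw seen with
  | case1 raw seen => exact fun x hx => hx
  | case2 cur rest raw seen h ih => exact ih
  | case3 cur rest raw seen h seen' hns ih =>
    exact fun x hx => ih x ((PySem.Set.mem_add seen cur x).mpr (Or.inl hx))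
  | case4 cur rest raw seen h seen' hns ih =>
    exact fun x hx => ih x ((PySem.Set.mem_add seen cur x).mpr (Or.inl hx))

theorem loopA_append (aliases : List (String × List String)) (xs : List String)
    (raw : List String) (seen : PySem.Set String) :
    ∀ ys, loopA aliases (xs ++ ys) raw seen =
      loopA aliases ys (loopA aliases xs raw seen).1 (loopA aliases xs raw seen).2 := by
  fun_induction loopA aliases xs raw seen with
  | case1 raw seen => intro ys; rw [List.nil_append]
  | case2 cur rest raw seen h ih =>
    intro ys
    rw [List.cons_append, loopA_cons, if_pos h, ih]
  | case3 cur rest raw seen h seen' hns ih =>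
    intro ys
    rw [List.cons_append, loopA_cons, if_neg h, if_pos hns, ih]
  | case4 cur rest raw seen h seen' hns ih =>
    intro ys
    rw [List.cons_append, loopA_cons, if_neg h, if_neg hns, ← List.append_assoc, ih]

theorem visit_eq_loopA (aliases : List (String × List String)) :
    ∀ m : Nat,
      (∀ cur raw seen, unseen aliases seen < m →
        visitB aliases m cur raw seen = loopA aliases [cur] raw seen) ∧
      (∀ xs raw seen, unseen aliases seen < m →
        visitListB aliases m xs raw seen = loopA aliases xs raw seen) := by
  intro m
  induction m with
  | zero => exact ⟨fun _ _ _ h => absurd h (by omega), fun _ _ _ h => absurd h (by omega)⟩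
  | succ m ih =>
    have hV : ∀ cur raw seen, unseen aliases seen < m + 1 →
        visitB aliases (m + 1) cur raw seen = loopA aliases [cur] raw seen := by
      intro cur raw seen hlt
      rw [visitB_succ, loopA_cons]
      by_cases h : seen.contains cur = true
      · rw [if_pos h, if_pos h, loopA_nil]
      · rw [if_neg h, if_neg h]
        by_cases hns : ¬ PySem.Str.startswith cur "@" = true
        · rw [if_pos hns, if_pos hns, loopA_nil]
        · rw [if_neg hns, if_neg hns]
          rcases hg : aliasGet? aliases (strTail cur) with _ | v
          · simp only [Option.getD_none]
            rw [visitListB_nil, List.nil_append, loopA_nil]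
          · have hmem := mem_tags_of_get?_some aliases cur v (by simpa using hns) hg
            have hlt' : unseen aliases (seen.add cur) < m := by
              have := unseen_add_lt aliases seen cur hmem (by simpa using h)
              omega
            simp only [Option.getD_some]
            rw [ih.2 v raw (seen.add cur) hlt', List.append_nil]
    refine ⟨hV, ?_⟩
    intro xs
    induction xs with
    | nil => intro raw seen _; rw [visitListB_nil, loopA_nil]
    | cons c cs ihx =>
      intro raw seen hlt
      rw [visitListB_cons, hV c raw seen hlt]
      have hsub := seen_subset_loopA aliases [c] raw seen
      have hlt2 : unseen aliases (loopA aliases [c] raw seen).2 < m + 1 :=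
        lt_of_le_of_lt (unseen_mono aliases seen _ hsub) hlt
      rw [ihx _ _ hlt2]
      have h := loopA_append aliases [c] raw seen cs
      rw [List.singleton_append] at h
      exact h.symm

theorem resolve_eq (lst : List String) (aliases : List (String × List String)) :
    resolve_srcs_py lst aliases = resolve_srcs_py_alt lst aliases := by
  unfold resolve_srcs_py resolve_srcs_py_alt
  have hlt : unseen aliases PySem.Set.empty < aliases.length + 1 := by
    unfold unseen
    have h1 : ((aliases.map (fun p => tagStr p.1)).toFinset \ (PySem.Set.empty : PySem.Set String).toFinset).card
        ≤ (aliases.map (fun p => tagStr p.1)).toFinset.card :=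
      Finset.card_le_card (Finset.sdiff_subset)
    have h2 : (aliases.map (fun p => tagStr p.1)).toFinset.card
        ≤ (aliases.map (fun p => tagStr p.1)).length := List.toFinset_card_le _
    simp only [List.length_map] at h2
    omega
  rw [(visit_eq_loopA aliases (aliases.length + 1)).2 lst [] PySem.Set.empty hlt]

-- ===== VERDICT (by name: the statement is the Claim_ definition above) =====
theorem resolve_srcs_py_spec : Claim_equal_resolve_srcs_py := by
  intro lst aliases _ _
  unfold Spec_resolve_srcs_py
  exact resolve_eq lst aliases
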